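-- pv_equiv track=rewrite | github.com/dsilvally-dipu/Cse422 | advesarial/task2.py | solve
-- ===== SOURCE A (Python) =====
-- def solve(arr, l, r, my_turn, must_take_one):
--
--     if l > r:
--         return 0
--
--     # MAX player
--     if my_turn:
--         best = -float('inf')
--
--         # take 1 from left
--         best = max(best, arr[l] + solve(arr, l+1, r, False, False))
--
--         # take 1 from right
--         best = max(best, arr[r] + solve(arr, l, r-1, False, False))
--
--         # take 2 (only if allowed)
--         if not must_take_one and l+1 <= r:
--             # left side
--             best = max(best, arr[l] + arr[l+1] + solve(arr, l+2, r, False, True))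
--             # right side
--             best = max(best, arr[r] + arr[r-1] + solve(arr, l, r-2, False, True))
--
--         return best
--
--     # MIN player
--     else:
--         best = float('inf')
--
--         # take 1 from left
--         best = min(best, solve(arr, l+1, r, True, False))
--
--         # take 1 from right
--         best = min(best, solve(arr, l, r-1, True, False))
--
--         # take 2 (only if allowed)
--         if not must_take_one and l+1 <= r:
--             best = min(best, solve(arr, l+2, r, True, True))
--             best = min(best, solve(arr, l, r-2, True, True))
--
--         return best
-- ===== SOURCE B (Python) =====
-- def solve(arr, l, r, my_turn, must_take_one):
--     if l > r:
--         return 0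
--     m = r - l + 1
--     # layer k holds, for every window arr[i..i+k-1] inside [l..r], the four game
--     # values (max free, max must-take-one, min free, min must-take-one),
--     # built bottom-up by window length instead of branching recursion.
--     prev2 = [(0, 0, 0, 0)] * (m + 1)
--     prev = prev2
--     for k in range(1, m + 1):
--         cur = []
--         for i in range(l, r - k + 2):
--             j = i + k - 1
--             maxT = max(arr[i] + prev[i + 1 - l][2], arr[j] + prev[i - l][2])
--             minT = min(prev[i + 1 - l][0], prev[i - l][0])
--             if k >= 2:
--                 maxF = max(maxT, arr[i] + arr[i + 1] + prev2[i + 2 - l][3],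
--                            arr[j] + arr[j - 1] + prev2[i - l][3])
--                 minF = min(minT, prev2[i + 2 - l][1], prev2[i - l][1])
--             else:
--                 maxF = maxT
--                 minF = minT
--             cur.append((maxF, maxT, minF, minT))
--         prev2 = prev
--         prev = cur
--     t = prev[0]
--     if my_turn:
--         return t[1] if must_take_one else t[0]
--     else:
--         return t[3] if must_take_one else t[2]
-- ===== Notes on version B (the rewrite author's own statement) =====
-- stated objective: alternative
-- what changed: Replaces the four-way game-tree recursion with a bottom-up dynamic program over window lengths that keeps only the last two layers of (max-free, max-must, min-free, min-must) values.
-- outside the precondition, e.g. on solve([], 0, 0, False, False): A returns 0, B raises IndexError; on solve([5], 3, 3, False, True): A returns 0, B raises IndexError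
import Mathlib
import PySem

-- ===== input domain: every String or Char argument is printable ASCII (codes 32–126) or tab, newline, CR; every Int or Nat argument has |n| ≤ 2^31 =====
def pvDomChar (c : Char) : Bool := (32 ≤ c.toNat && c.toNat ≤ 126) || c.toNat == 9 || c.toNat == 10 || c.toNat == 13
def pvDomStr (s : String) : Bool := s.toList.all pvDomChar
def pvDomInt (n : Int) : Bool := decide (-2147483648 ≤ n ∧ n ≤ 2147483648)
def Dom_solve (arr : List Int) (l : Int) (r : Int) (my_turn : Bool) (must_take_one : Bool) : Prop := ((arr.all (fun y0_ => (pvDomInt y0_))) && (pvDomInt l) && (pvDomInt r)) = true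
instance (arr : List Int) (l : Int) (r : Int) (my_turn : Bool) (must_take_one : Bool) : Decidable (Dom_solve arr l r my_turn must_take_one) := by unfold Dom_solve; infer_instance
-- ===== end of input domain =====

-- B replaces A's branching game-tree recursion by a bottom-up dynamic program over window
-- lengths keeping two layers of (max-free, max-must, min-free, min-must) values;
-- equal return values are proved on Pre_solve (in-range index intervals).

-- ===== PORT A =====
-- arr[i] with Python index semantics (negative = from the end); Pre_solve keeps every
-- access in range, so the .getD default is unreachable on the claimed domain.
def pvGet (arr : List Int) (i : Int) : Int := (PySem.List.pyGet? arr i).getD 0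

-- literal port of A; the ±inf sentinels are elided because the first max/min with a
-- finite operand always selects that operand.
def solve (arr : List Int) (l : Int) (r : Int) (my_turn : Bool) (must_take_one : Bool) : Int :=
  if _h : l > r then 0
  else if my_turn then
    -- take 1 from left, then 1 from right
    let b1 := pvGet arr l + solve arr (l+1) r false false
    let b2 := max b1 (pvGet arr r + solve arr l (r-1) false false)
    -- take 2 (only if allowed)
    if _h2 : ¬ must_take_one ∧ l + 1 ≤ r then
      max (max b2 (pvGet arr l + pvGet arr (l+1) + solve arr (l+2) r false true))
          (pvGet arr r + pvGet arr (r-1) + solve arr l (r-2) false true)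
    else b2
  else
    let b1 := solve arr (l+1) r true false
    let b2 := min b1 (solve arr l (r-1) true false)
    if _h2 : ¬ must_take_one ∧ l + 1 ≤ r then
      min (min b2 (solve arr (l+2) r true true)) (solve arr l (r-2) true true)
    else b2
termination_by (r - l + 1).toNat
decreasing_by all_goals omega

-- ===== PORT B =====
-- prev[t] / prev2[t] lookup (always in range in B's loops)
def pvQ (xs : List (Int × Int × Int × Int)) (i : Int) : Int × Int × Int × Int :=
  (PySem.List.pyGet? xs i).getD (0, 0, 0, 0)

-- body of B's outer 'for k in range(1, m+1)' loop: from layers k-2 and k-1 build layer k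
def pvStep (arr : List Int) (l : Int) (r : Int)
    (st : List (Int × Int × Int × Int) × List (Int × Int × Int × Int)) (k : Int) :
    List (Int × Int × Int × Int) × List (Int × Int × Int × Int) :=
  let prev2 := st.1
  let prev := st.2
  let cur := (PySem.List.pyRange l (r - k + 2) 1).foldl (fun cur i =>
    let j := i + k - 1
    let maxT := max (pvGet arr i + (pvQ prev (i+1-l)).2.2.1) (pvGet arr j + (pvQ prev (i-l)).2.2.1)
    let minT := min (pvQ prev (i+1-l)).1 (pvQ prev (i-l)).1
    let p :=
      if 2 ≤ k then
        (max (max maxT (pvGet arr i + pvGet arr (i+1) + (pvQ prev2 (i+2-l)).2.2.2))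
             (pvGet arr j + pvGet arr (j-1) + (pvQ prev2 (i-l)).2.2.2),
         min (min minT (pvQ prev2 (i+2-l)).2.1) (pvQ prev2 (i-l)).2.1)
      else (maxT, minT)
    cur ++ [(p.1, maxT, p.2, minT)]) []
  (prev, cur)

def solve_alt (arr : List Int) (l : Int) (r : Int) (my_turn : Bool) (must_take_one : Bool) : Int :=
  if l > r then 0
  else
    let m : Int := r - l + 1
    let layer0 : List (Int × Int × Int × Int) := List.replicate (m + 1).toNat (0, 0, 0, 0)
    let st := (PySem.List.pyRange 1 (m + 1) 1).foldl (pvStep arr l r) (layer0, layer0)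
    let t := pvQ st.2 0
    if my_turn then (if must_take_one then t.2.1 else t.1)
    else (if must_take_one then t.2.2.2 else t.2.2.1)

-- ===== PRECONDITION & SPEC =====
-- Pre_solve excludes out-of-range index intervals: on almost all of them A raises
-- IndexError; on the degenerate single-cell ones with the minimizing player to move A
-- happens to return 0 without ever reading the array, while B's table construction
-- still indexes the array and raises there.
def Pre_solve (arr : List Int) (l : Int) (r : Int) (my_turn : Bool) (must_take_one : Bool) : Prop :=
  l > r ∨ (-(arr.length : Int) ≤ l ∧ l ≤ r ∧ r < (arr.length : Int))
instance (arr : List Int) (l : Int) (r : Int) (my_turn : Bool) (must_take_one : Bool) : Decidable (Pre_solve arr l r my_turn must_take_one) := by unfold Pre_solve; infer_instance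

def pvWitness_solve : List Int × Int × Int × Bool × Bool := ([1, 2, 3], 0, 2, true, false)

def Spec_solve (arr : List Int) (l : Int) (r : Int) (my_turn : Bool) (must_take_one : Bool) (out : Int) : Prop := out = solve_alt arr l r my_turn must_take_one
instance (arr : List Int) (l : Int) (r : Int) (my_turn : Bool) (must_take_one : Bool) (out : Int) : Decidable (Spec_solve arr l r my_turn must_take_one out) := by unfold Spec_solve; infer_instance

-- ===== CLAIM (what is proved, stated in full; the proofs are below) =====
def Claim_equal_solve : Prop := ∀ (arr : List Int) (l : Int) (r : Int) (my_turn : Bool) (must_take_one : Bool), Dom_solve arr l r my_turn must_take_one → Pre_solve arr l r my_turn must_take_one → Spec_solve arr l r my_turn must_take_one (solve arr l r my_turn must_take_one)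

-- ===== LEMMAS AND PROOFS =====

-- the layer of exact game values for all windows of length k inside [l, l+m-1]
def pvLayer (arr : List Int) (l : Int) (m k : Nat) : List (Int × Int × Int × Int) :=
  (List.range (m - k + 1)).map (fun (t : Nat) =>
    (solve arr (l + (t : Int)) (l + (t : Int) + (k : Int) - 1) true false,
     solve arr (l + (t : Int)) (l + (t : Int) + (k : Int) - 1) true true,
     solve arr (l + (t : Int)) (l + (t : Int) + (k : Int) - 1) false false,
     solve arr (l + (t : Int)) (l + (t : Int) + (k : Int) - 1) false true))

lemma solve_base (arr : List Int) (i j : Int) (a b : Bool) (h : i > j) :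
    solve arr i j a b = 0 := by
  rw [solve]; simp [h]

lemma pvLayer_zero (arr : List Int) (l : Int) (m : Nat) :
    pvLayer arr l m 0 = List.replicate (m + 1) (0, 0, 0, 0) := by
  unfold pvLayer
  rw [List.eq_replicate_iff]
  refine ⟨by simp, ?_⟩
  intro q hq
  rcases List.mem_map.1 hq with ⟨t, _, rfl⟩
  refine Prod.ext ?_ (Prod.ext ?_ (Prod.ext ?_ ?_)) <;>
    exact solve_base arr _ _ _ _ (by omega)

lemma pvQ_layer (arr : List Int) (l : Int) (m k t : Nat) (h : t < m - k + 1) :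
    pvQ (pvLayer arr l m k) (t : Int) =
      (solve arr (l + t) (l + t + k - 1) true false,
       solve arr (l + t) (l + t + k - 1) true true,
       solve arr (l + t) (l + t + k - 1) false false,
       solve arr (l + t) (l + t + k - 1) false true) := by
  unfold pvQ pvLayer
  rw [PySem.List.pyGet?_natCast]
  rw [List.getElem?_map, List.getElem?_range h]
  simp

lemma solve_TT (arr : List Int) (i j : Int) (h : i ≤ j) :
    solve arr i j true true =
      max (pvGet arr i + solve arr (i+1) j false false)
          (pvGet arr j + solve arr i (j-1) false false) := by
  rw [solve]; simp [show ¬ i > j by omega]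

lemma solve_FT (arr : List Int) (i j : Int) (h : i ≤ j) :
    solve arr i j false true =
      min (solve arr (i+1) j true false) (solve arr i (j-1) true false) := by
  rw [solve]; simp [show ¬ i > j by omega]

lemma solve_TF (arr : List Int) (i j : Int) (h : i + 1 ≤ j) :
    solve arr i j true false =
      max (max (max (pvGet arr i + solve arr (i+1) j false false)
                    (pvGet arr j + solve arr i (j-1) false false))
               (pvGet arr i + pvGet arr (i+1) + solve arr (i+2) j false true))
          (pvGet arr j + pvGet arr (j-1) + solve arr i (j-2) false true) := by
  rw [solve]; simp [show ¬ i > j by omega, h]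

lemma solve_FF (arr : List Int) (i j : Int) (h : i + 1 ≤ j) :
    solve arr i j false false =
      min (min (min (solve arr (i+1) j true false) (solve arr i (j-1) true false))
               (solve arr (i+2) j true true))
          (solve arr i (j-2) true true) := by
  rw [solve]; simp [show ¬ i > j by omega, h]

lemma solve_TF_eq (arr : List Int) (i : Int) :
    solve arr i i true false = solve arr i i true true := by
  conv_rhs => rw [solve_TT arr i i le_rfl]
  rw [solve]; simp [show ¬ (i + 1 ≤ i) by omega]

lemma solve_FF_eq (arr : List Int) (i : Int) :
    solve arr i i false false = solve arr i i false true := by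
  conv_rhs => rw [solve_FT arr i i le_rfl]
  rw [solve]; simp [show ¬ (i + 1 ≤ i) by omega]

lemma pvStep_spec (arr : List Int) (l r : Int) (hlr : l ≤ r) (K : Nat)
    (hK : K < (r - l + 1).toNat) :
    pvStep arr l r (pvLayer arr l (r - l + 1).toNat (K - 1), pvLayer arr l (r - l + 1).toNat K)
        (1 + (K : Int)) =
      (pvLayer arr l (r - l + 1).toNat K, pvLayer arr l (r - l + 1).toNat (K + 1)) := by
  unfold pvStep
  refine Prod.ext rfl ?_
  have hrange : PySem.List.pyRange l (r - (1 + (K : Int)) + 2) 1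
      = (List.range ((r - l + 1).toNat - K)).map (fun (t : Nat) => l + (t : Int)) := by
    rw [PySem.List.pyRange_one]
    congr 2
    omega
  simp only [hrange, List.foldl_map, PySem.List.foldl_append_singleton_eq_map]
  conv_rhs => rw [pvLayer]
  rw [show (r - l + 1).toNat - (K + 1) + 1 = (r - l + 1).toNat - K by omega]
  refine List.map_congr_left ?_
  intro t ht
  rw [List.mem_range] at ht
  have e1 : l + (t : Int) + 1 - l = ((t + 1 : Nat) : Int) := by push_cast; ring
  have e0 : l + (t : Int) - l = ((t : Nat) : Int) := by ring
  have e2 : l + (t : Int) + 2 - l = ((t + 2 : Nat) : Int) := by push_cast; ring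
  rw [e1, e0, e2]
  rw [pvQ_layer arr l (r - l + 1).toNat K (t + 1) (by omega),
      pvQ_layer arr l (r - l + 1).toNat K t (by omega)]
  cases K with
  | zero =>
    rw [if_neg (by norm_num)]
    dsimp only
    push_cast
    ring_nf
    rw [solve_TF_eq, solve_FF_eq,
        solve_TT arr (l + (t : Int)) (l + (t : Int)) le_rfl,
        solve_FT arr (l + (t : Int)) (l + (t : Int)) le_rfl]
    ring_nf
  | succ K' =>
    rw [if_pos (by push_cast; omega)]
    rw [show K' + 1 - 1 = K' from rfl]
    rw [pvQ_layer arr l (r - l + 1).toNat K' (t + 2) (by omega),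
        pvQ_layer arr l (r - l + 1).toNat K' t (by omega)]
    dsimp only
    push_cast
    ring_nf
    rw [solve_TF arr (l + (t : Int)) (1 + l + (t : Int) + (K' : Int)) (by omega),
        solve_FF arr (l + (t : Int)) (1 + l + (t : Int) + (K' : Int)) (by omega),
        solve_TT arr (l + (t : Int)) (1 + l + (t : Int) + (K' : Int)) (by omega),
        solve_FT arr (l + (t : Int)) (1 + l + (t : Int) + (K' : Int)) (by omega)]
    ring_nf

lemma pv_fold_inv (arr : List Int) (l r : Int) (hlr : l ≤ r) (K : Nat)
    (hK : K ≤ (r - l + 1).toNat) :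
    ((List.range K).map (fun (κ : Nat) => (1 : Int) + (κ : Int))).foldl (pvStep arr l r)
        (pvLayer arr l (r - l + 1).toNat 0, pvLayer arr l (r - l + 1).toNat 0) =
      (pvLayer arr l (r - l + 1).toNat (K - 1), pvLayer arr l (r - l + 1).toNat K) := by
  induction K with
  | zero => simp
  | succ K ih =>
    rw [List.range_succ, List.map_append, List.foldl_append, ih (by omega)]
    simpa using pvStep_spec arr l r hlr K (by omega)

lemma solve_eq_alt (arr : List Int) (l r : Int) (mt mto : Bool) :
    solve arr l r mt mto = solve_alt arr l r mt mto := by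
  by_cases hlr : l > r
  · rw [solve]; simp [solve_alt, hlr]
  · have hle : l ≤ r := by omega
    unfold solve_alt
    rw [if_neg hlr]
    have hrange : PySem.List.pyRange 1 (r - l + 1 + 1) 1
        = (List.range (r - l + 1).toNat).map (fun (κ : Nat) => (1 : Int) + (κ : Int)) := by
      rw [PySem.List.pyRange_one]
      congr 2
      omega
    have hrep : List.replicate (r - l + 1 + 1).toNat ((0 : Int), (0 : Int), (0 : Int), (0 : Int))
        = pvLayer arr l (r - l + 1).toNat 0 := by
      rw [pvLayer_zero]
      congr 1
      omega
    simp only [hrange, hrep]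
    rw [pv_fold_inv arr l r hle (r - l + 1).toNat le_rfl]
    have h0 := pvQ_layer arr l (r - l + 1).toNat (r - l + 1).toNat 0 (by omega)
    have harg : l + ((0 : Nat) : Int) + ((r - l + 1).toNat : Int) - 1 = r := by omega
    rw [harg] at h0
    have harg2 : l + ((0 : Nat) : Int) = l := by omega
    rw [harg2] at h0
    push_cast at h0
    rw [h0]
    cases mt <;> cases mto <;> simp

-- ===== VERDICT (by name: the statement is the Claim_ definition above) =====
theorem solve_spec : Claim_equal_solve := by
  intro arr l r mt mto _ _
  unfold Spec_solve
  exact solve_eq_alt arr l r mt mto
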